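-- pv_equiv track=rewrite | github.com/aarithi123/python | rle/rle_program.py | to_rle_string
-- ===== SOURCE A (Python) =====
-- def to_hex_string(data):
--     hex_value = ''
--     for i in range(0, len(data)):
--         if data[i] == 10:
--             hex_value += 'a'
--         elif data[i] == 11:
--             hex_value += 'b'
--         elif data[i] == 12:
--             hex_value += 'c'
--         elif data[i] == 13:
--             hex_value += 'd'
--         elif data[i] == 14:
--             hex_value += 'e'
--         elif data[i] == 15:
--             hex_value += 'f'
--         else:
--             hex_value += str(data[i])
--     return str(hex_value)
--
-- def to_rle_string(rle_data):
--     rle_string = ''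
--     length = len(rle_data)
--     for i in range(0, len(rle_data)):
--         if i % 2 == 0:
--             rle_string += str(rle_data[i])
--         else:
--             rle = to_hex_string([rle_data[i]])
--             length -= 2
--             if length >= 2:
--                 rle_string += rle + ':'
--             else:
--                 rle_string += rle
--     return rle_string
-- ===== SOURCE B (Python) =====
-- def to_rle_string(rle_data):
--     def hex1(v):
--         if v == 10:
--             return 'a'
--         elif v == 11:
--             return 'b'
--         elif v == 12:
--             return 'c'
--         elif v == 13:
--             return 'd'
--         elif v == 14:
--             return 'e'
--         elif v == 15:
--             return 'f'
--         else:
--             return str(v)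
--
--     parts = []
--     i = 0
--     while i + 1 < len(rle_data):
--         parts.append(str(rle_data[i]) + hex1(rle_data[i + 1]))
--         i += 2
--     s = ':'.join(parts)
--     if i < len(rle_data):
--         s += str(rle_data[i])
--     return s
-- ===== Notes on version B (the rewrite author's own statement) =====
-- stated objective: simpler
-- what changed: Replaces the index-parity loop with a decrementing length counter by a pairwise pass that builds one string per (count, value) pair and ':'.join's them, gluing a trailing odd element on at the end.
import Mathlib
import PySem

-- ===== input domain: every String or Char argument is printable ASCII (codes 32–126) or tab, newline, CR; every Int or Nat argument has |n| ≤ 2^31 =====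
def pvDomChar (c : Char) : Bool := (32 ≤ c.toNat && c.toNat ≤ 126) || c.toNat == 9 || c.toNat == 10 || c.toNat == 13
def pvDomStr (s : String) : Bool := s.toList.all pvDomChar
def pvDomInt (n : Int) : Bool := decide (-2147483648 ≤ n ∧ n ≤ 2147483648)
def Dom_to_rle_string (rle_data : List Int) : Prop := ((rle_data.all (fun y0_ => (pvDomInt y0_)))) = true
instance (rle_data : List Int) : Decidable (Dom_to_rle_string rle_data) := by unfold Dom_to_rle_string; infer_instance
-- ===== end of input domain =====

-- B replaces A's index-parity loop with decrementing length counter by a pairwise pass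
-- joined with ':' plus a glued trailing odd element (objective: simpler).


-- ===== PORT A =====
-- helper to_hex_string: the for-loop over data, appending one piece per element
def to_hex_string (data : List Int) : String :=
  data.foldl (fun hex_value x =>
    if x == 10 then hex_value ++ "a"
    else if x == 11 then hex_value ++ "b"
    else if x == 12 then hex_value ++ "c"
    else if x == 13 then hex_value ++ "d"
    else if x == 14 then hex_value ++ "e"
    else if x == 15 then hex_value ++ "f"
    else hex_value ++ PySem.Int.toStr x) ""

-- A's for-loop: index i, mutable length counter and accumulated string as recursion state
def to_rle_loop : List Int → Nat → Int → String → String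
  | [], _, _, rle_string => rle_string
  | x :: rest, i, length, rle_string =>
    if i % 2 = 0 then
      to_rle_loop rest (i + 1) length (rle_string ++ PySem.Int.toStr x)
    else
      let rle := to_hex_string [x]
      let length' := length - 2
      if length' ≥ 2 then to_rle_loop rest (i + 1) length' (rle_string ++ rle ++ ":")
      else to_rle_loop rest (i + 1) length' (rle_string ++ rle)

def to_rle_string (rle_data : List Int) : String :=
  to_rle_loop rle_data 0 (rle_data.length : Int) ""

-- ===== PORT B =====
def hex1 (v : Int) : String :=
  if v == 10 then "a"
  else if v == 11 then "b"
  else if v == 12 then "c"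
  else if v == 13 then "d"
  else if v == 14 then "e"
  else if v == 15 then "f"
  else PySem.Int.toStr v

-- the while-loop: one string per complete pair
def rle_parts : List Int → List String
  | [] => []
  | [_] => []
  | a :: b :: rest => (PySem.Int.toStr a ++ hex1 b) :: rle_parts rest

-- the leftover 'rest' after the while-loop ([] or a single element)
def rle_rest : List Int → List Int
  | [] => []
  | [x] => [x]
  | _ :: _ :: rest => rle_rest rest

def to_rle_string_alt (rle_data : List Int) : String :=
  let s := PySem.Str.join ":" (rle_parts rle_data)
  match rle_rest rle_data with
  | x :: _ => s ++ PySem.Int.toStr x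
  | [] => s

-- ===== PRECONDITION & SPEC =====
def Spec_to_rle_string (rle_data : List Int) (out : String) : Prop := out = to_rle_string_alt rle_data
instance (rle_data : List Int) (out : String) : Decidable (Spec_to_rle_string rle_data out) := by unfold Spec_to_rle_string; infer_instance

-- ===== CLAIM (what is proved, stated in full; the proofs are below) =====
def Claim_equal_to_rle_string : Prop := ∀ (rle_data : List Int), Dom_to_rle_string rle_data → Spec_to_rle_string rle_data (to_rle_string rle_data)

-- ===== LEMMAS AND PROOFS =====
theorem hex_single (x : Int) : to_hex_string [x] = hex1 x := by
  simp [to_hex_string, hex1, String.empty_append]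

theorem join_nil : PySem.Str.join ":" ([] : List String) = "" := by decide

theorem join_single (a : String) : PySem.Str.join ":" [a] = a := by
  simp [PySem.Str.join, String.ofList_toList]

theorem join_cons2 (a b : String) (l : List String) :
    PySem.Str.join ":" (a :: b :: l) = a ++ ":" ++ PySem.Str.join ":" (b :: l) := by
  simp [PySem.Str.join, PySem.Chars.join_cons_cons, String.ofList_append, String.ofList_toList,
    String.append_assoc]
  rw [← List.singleton_append, String.ofList_append]

theorem loop_even_step (x : Int) (rest : List Int) (i : Nat) (L : Int) (acc : String)
    (hi : i % 2 = 0) :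
    to_rle_loop (x :: rest) i L acc = to_rle_loop rest (i + 1) L (acc ++ PySem.Int.toStr x) := by
  rw [to_rle_loop, if_pos hi]

theorem loop_odd_step (x : Int) (rest : List Int) (i : Nat) (L : Int) (acc : String)
    (hi : ¬ (i % 2 = 0)) :
    to_rle_loop (x :: rest) i L acc =
      if L - 2 ≥ 2 then to_rle_loop rest (i + 1) (L - 2) (acc ++ to_hex_string [x] ++ ":")
      else to_rle_loop rest (i + 1) (L - 2) (acc ++ to_hex_string [x]) := by
  rw [to_rle_loop, if_neg hi]

theorem loop_eq : ∀ (l : List Int) (acc : String) (i : Nat), i % 2 = 0 →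
    to_rle_loop l i (l.length : Int) acc = acc ++ to_rle_string_alt l := by
  intro l
  induction l using rle_parts.induct with
  | case1 =>
    intro acc i _
    simp [to_rle_loop, to_rle_string_alt, rle_parts, rle_rest, join_nil]
  | case2 x =>
    intro acc i hi
    rw [loop_even_step x [] i _ acc hi]
    simp [to_rle_loop, to_rle_string_alt, rle_parts, rle_rest, join_nil, String.empty_append]
  | case3 a b rest ih =>
    intro acc i hi
    have hi1 : ¬ ((i + 1) % 2 = 0) := by omega
    rw [loop_even_step a (b :: rest) i _ acc hi,
        loop_odd_step b rest (i + 1) _ _ hi1]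
    have hlen : ((a :: b :: rest).length : Int) - 2 = (rest.length : Int) := by
      simp; omega
    rw [hlen]
    match rest with
    | [] =>
      rw [if_neg (by norm_num)]
      simp [to_rle_loop, to_rle_string_alt, rle_parts, rle_rest, join_single, hex_single,
        String.append_assoc]
    | [c] =>
      rw [if_neg (by norm_num)]
      have hi2 : (i + 1 + 1) % 2 = 0 := by omega
      rw [loop_even_step c [] (i + 1 + 1) _ _ hi2]
      simp [to_rle_loop, to_rle_string_alt, rle_parts, rle_rest, join_single, hex_single,
        String.append_assoc]
    | c :: d :: rest' =>
      rw [if_pos (by simp; omega)]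
      have hi2 : (i + 1 + 1) % 2 = 0 := by omega
      rw [ih (acc ++ PySem.Int.toStr a ++ to_hex_string [b] ++ ":") (i + 1 + 1) hi2]
      simp only [to_rle_string_alt, rle_parts, rle_rest, join_cons2, hex_single]
      cases h : rle_rest rest' <;> simp [String.append_assoc]

-- ===== VERDICT (by name: the statement is the Claim_ definition above) =====
theorem to_rle_string_spec : Claim_equal_to_rle_string := by
  intro l _
  unfold Spec_to_rle_string to_rle_string
  rw [loop_eq l "" 0 rfl, String.empty_append]
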